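-- pv_equiv track=rewrite | github.com/Thomas-LEPINE/crypto-e-vote_5A | Hash_TTH.py | get_sum_by_col
-- ===== SOURCE A (Python) =====
-- def get_sum_by_col(mat):
--     i0 = 0
--     i1 = 0
--     i2=0
--     i3=0
--     for ligne in mat:
--         i0+=ligne[0]
--         i1 += ligne[1]
--         i2 += ligne[2]
--         i3 += ligne[3]
--     sum=[]
--     sum.append(i0%26)
--     sum.append(i1%26)
--     sum.append(i2%26)
--     sum.append(i3%26)
--     return sum
-- ===== SOURCE B (Python) =====
-- def get_sum_by_col(mat):
--     return [sum(row[i] for row in mat) % 26 for i in range(4)]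
-- ===== Notes on version B (the rewrite author's own statement) =====
-- stated objective: idiomatic
-- what changed: Replaces the four interleaved accumulators and appended result list with a single comprehension computing each column sum independently (four passes over mat, one per column).
import Mathlib
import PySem

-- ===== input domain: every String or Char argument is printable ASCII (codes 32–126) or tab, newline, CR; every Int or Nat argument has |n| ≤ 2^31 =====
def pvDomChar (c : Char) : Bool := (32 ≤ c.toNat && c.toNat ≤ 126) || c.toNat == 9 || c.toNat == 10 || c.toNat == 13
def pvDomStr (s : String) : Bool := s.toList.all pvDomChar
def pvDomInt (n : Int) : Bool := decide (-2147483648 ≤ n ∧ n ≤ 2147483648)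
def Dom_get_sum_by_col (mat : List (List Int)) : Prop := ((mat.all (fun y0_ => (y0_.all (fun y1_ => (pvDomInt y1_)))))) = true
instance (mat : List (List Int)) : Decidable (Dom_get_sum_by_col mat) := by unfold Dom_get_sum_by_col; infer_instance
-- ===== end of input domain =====

-- B replaces A's four interleaved accumulators with an independent per-column sum comprehension; same cost, more idiomatic.

-- ===== PORT A =====
-- A: single loop accumulating i0..i3 via ligne[0..3] (pyGetD is exact under Pre_: every row has length ≥ 4), then appends the four mods.
def get_sum_by_col (mat : List (List Int)) : List Int :=
  let s := mat.foldl
    (fun (acc : Int × Int × Int × Int) ligne =>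
      (acc.1 + PySem.List.pyGetD ligne 0 0,
       acc.2.1 + PySem.List.pyGetD ligne 1 0,
       acc.2.2.1 + PySem.List.pyGetD ligne 2 0,
       acc.2.2.2 + PySem.List.pyGetD ligne 3 0))
    (0, 0, 0, 0)
  [PySem.Int.mod s.1 26, PySem.Int.mod s.2.1 26, PySem.Int.mod s.2.2.1 26, PySem.Int.mod s.2.2.2 26]

-- ===== PORT B =====
-- B: [sum(row[i] for row in mat) % 26 for i in range(4)]
def get_sum_by_col_alt (mat : List (List Int)) : List Int :=
  (PySem.List.pyRange 0 4 1).map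
    (fun i => PySem.Int.mod ((mat.map (fun row => PySem.List.pyGetD row i 0)).sum) 26)

-- ===== PRECONDITION & SPEC =====
-- Pre_ excludes matrices containing a row shorter than 4, on which A (and B) raise IndexError.
def Pre_get_sum_by_col (mat : List (List Int)) : Prop := ∀ row ∈ mat, 4 ≤ row.length
instance (mat : List (List Int)) : Decidable (Pre_get_sum_by_col mat) := by unfold Pre_get_sum_by_col; infer_instance
def pvWitness_get_sum_by_col : List (List Int) := [[1, 2, 3, 4], [25, 26, 27, -3]]

def Spec_get_sum_by_col (mat : List (List Int)) (out : List Int) : Prop := out = get_sum_by_col_alt mat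
instance (mat : List (List Int)) (out : List Int) : Decidable (Spec_get_sum_by_col mat out) := by unfold Spec_get_sum_by_col; infer_instance

-- ===== CLAIM (what is proved, stated in full; the proofs are below) =====
def Claim_equal_get_sum_by_col : Prop := ∀ (mat : List (List Int)), Dom_get_sum_by_col mat → Pre_get_sum_by_col mat → Spec_get_sum_by_col mat (get_sum_by_col mat)

-- ===== LEMMAS AND PROOFS =====

-- A's fold with four accumulators equals the four column sums, shifted by the initial state.
theorem foldl_cols (mat : List (List Int)) (a b c d : Int) :
    mat.foldl
      (fun (acc : Int × Int × Int × Int) ligne =>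
        (acc.1 + PySem.List.pyGetD ligne 0 0,
         acc.2.1 + PySem.List.pyGetD ligne 1 0,
         acc.2.2.1 + PySem.List.pyGetD ligne 2 0,
         acc.2.2.2 + PySem.List.pyGetD ligne 3 0))
      (a, b, c, d) =
    (a + (mat.map (fun row => PySem.List.pyGetD row 0 0)).sum,
     b + (mat.map (fun row => PySem.List.pyGetD row 1 0)).sum,
     c + (mat.map (fun row => PySem.List.pyGetD row 2 0)).sum,
     d + (mat.map (fun row => PySem.List.pyGetD row 3 0)).sum) := by
  induction mat generalizing a b c d with
  | nil => simp
  | cons r t ih => simp [List.foldl_cons, ih]; refine ⟨by ring, by ring, by ring, by ring⟩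

-- ===== VERDICT (by name: the statement is the Claim_ definition above) =====
theorem get_sum_by_col_spec : Claim_equal_get_sum_by_col := by
  intro mat _ _
  unfold Spec_get_sum_by_col get_sum_by_col get_sum_by_col_alt
  rw [foldl_cols]
  simp [PySem.List.pyRange]
  rfl
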